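-- pv_equiv track=rewrite | github.com/kuznetsovvj/education | algorithms/leetcode/2125m.py | nubmerOfBeams
-- ===== SOURCE A (Python) =====
-- def nubmerOfBeams(bank):
--     res = 0
--     cur = 0
--     for line in bank:
--         t = 0
--         for item in line:
--             if item == '1':
--                 t += 1
--         if cur == 0:
--             cur = t
--         else:
--             if t != 0:
--                 res += t * cur
--                 cur = t
--     return res
-- ===== SOURCE B (Python) =====
-- def nubmerOfBeams(bank):
--     # For each row with devices, look ahead to the next row with devices
--     # and multiply the two device counts; no running state is kept.
--     def count1(row):
--         return sum(1 for ch in row if ch == '1')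
--     res = 0
--     for i, row in enumerate(bank):
--         c = count1(row)
--         if c == 0:
--             continue
--         for nxt in bank[i + 1:]:
--             d = count1(nxt)
--             if d != 0:
--                 res += c * d
--                 break
--     return res
-- ===== Notes on version B (the rewrite author's own statement) =====
-- stated objective: alternative
-- what changed: Replaces A's single-pass res/cur state machine with a stateless per-row lookahead: every row with devices scans forward for the next row with devices and adds the product of the two counts.
import Mathlib
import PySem

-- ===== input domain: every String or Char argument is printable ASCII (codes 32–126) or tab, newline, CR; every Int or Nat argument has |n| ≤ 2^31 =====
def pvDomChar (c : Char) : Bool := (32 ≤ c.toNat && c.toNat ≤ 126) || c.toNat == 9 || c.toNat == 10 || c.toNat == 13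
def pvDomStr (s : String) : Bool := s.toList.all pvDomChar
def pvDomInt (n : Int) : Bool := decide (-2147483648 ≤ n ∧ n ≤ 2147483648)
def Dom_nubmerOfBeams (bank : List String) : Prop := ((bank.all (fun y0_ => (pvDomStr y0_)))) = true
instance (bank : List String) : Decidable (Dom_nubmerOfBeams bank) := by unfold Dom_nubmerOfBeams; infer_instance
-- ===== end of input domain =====

-- B replaces A's single-pass res/cur state machine with a stateless per-row lookahead
-- (each device row scans forward for the next device row and adds the product); alternative, same result.


-- ===== PORT A =====
def nubmerOfBeams (bank : List String) : Int :=
  (bank.foldl (fun (rc : Int × Int) line =>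
    let t := line.toList.foldl (fun t item => if item == '1' then t + 1 else t) (0 : Int)
    if rc.2 = 0 then (rc.1, t)
    else if t ≠ 0 then (rc.1 + t * rc.2, t) else rc) ((0 : Int), (0 : Int))).1

-- ===== PORT B =====
-- count1: sum(1 for ch in row if ch == '1')
def pvCount (row : String) : Int :=
  row.toList.foldl (fun t ch => if ch == '1' then t + 1 else t) (0 : Int)

-- inner loop: for nxt in bank[i+1:] — first row with devices, contribution c * d (break)
def pvAltInner (c : Int) : List String → Int
  | [] => 0
  | nxt :: rest =>
      let d := pvCount nxt
      if d ≠ 0 then c * d else pvAltInner c rest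

-- outer loop over rows; at row with suffix rs, bank[i+1:] = rs
def pvAltOuter : List String → Int → Int
  | [], res => res
  | row :: rs, res =>
      let c := pvCount row
      if c = 0 then pvAltOuter rs res
      else pvAltOuter rs (res + pvAltInner c rs)

def nubmerOfBeams_alt (bank : List String) : Int := pvAltOuter bank 0

-- ===== PRECONDITION & SPEC =====
def Spec_nubmerOfBeams (bank : List String) (out : Int) : Prop := out = nubmerOfBeams_alt bank
instance (bank : List String) (out : Int) : Decidable (Spec_nubmerOfBeams bank out) := by unfold Spec_nubmerOfBeams; infer_instance

-- ===== CLAIM (what is proved, stated in full; the proofs are below) =====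
def Claim_equal_nubmerOfBeams : Prop := ∀ (bank : List String), Dom_nubmerOfBeams bank → Spec_nubmerOfBeams bank (nubmerOfBeams bank)

-- ===== LEMMAS AND PROOFS =====

-- sum of adjacent-pair products of a list of counts
def pvPairSum : List Int → Int
  | a :: b :: r => a * b + pvPairSum (b :: r)
  | _ => 0

-- first nonzero element of a list (0 if none)
def pvHeadNZ (l : List Int) : Int := (l.filter (fun t => t ≠ 0)).headD 0

-- A's per-step state update, on the row's precomputed count
def pvStep (rc : Int × Int) (t : Int) : Int × Int :=
  if rc.2 = 0 then (rc.1, t)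
  else if t ≠ 0 then (rc.1 + t * rc.2, t) else rc

lemma pvFold_pos (ts : List Int) (res cur : Int) (h : cur ≠ 0) :
    ts.foldl pvStep (res, cur)
      = (res + pvPairSum (cur :: ts.filter (fun t => t ≠ 0)),
         (ts.filter (fun t => t ≠ 0)).getLastD cur) := by
  induction ts generalizing res cur with
  | nil => simp [pvPairSum]
  | cons t ts ih =>
    by_cases ht : t = 0
    · subst ht
      simp only [List.foldl_cons, pvStep, h, ite_false]
      simpa using ih res cur h
    · simp only [List.foldl_cons, pvStep, if_neg h, if_pos ht]
      rw [ih (res + t * cur) t ht,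
        show List.filter (fun t => decide (t ≠ 0)) (t :: ts)
          = t :: List.filter (fun t => decide (t ≠ 0)) ts by simp [ht]]
      refine Prod.ext ?_ ?_
      · show res + t * cur + pvPairSum (t :: ts.filter (fun t => t ≠ 0))
          = res + pvPairSum (cur :: t :: ts.filter (fun t => t ≠ 0))
        simp only [pvPairSum]
        ring
      · rw [List.getLastD_cons]

lemma pvFold_zero (ts : List Int) (res : Int) :
    (ts.foldl pvStep (res, 0)).1 = res + pvPairSum (ts.filter (fun t => t ≠ 0)) := by
  induction ts generalizing res with
  | nil => simp [pvPairSum]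
  | cons t ts ih =>
    by_cases ht : t = 0
    · subst ht
      simpa using ih res
    · simp only [List.foldl_cons]
      rw [show pvStep (res, 0) t = (res, t) from by simp [pvStep], pvFold_pos ts res t ht,
        show List.filter (fun t => decide (t ≠ 0)) (t :: ts)
          = t :: List.filter (fun t => decide (t ≠ 0)) ts by simp [ht]]

-- B's inner scan picks out the first nonzero count ahead
lemma pvAltInner_eq (c : Int) (rs : List String) :
    pvAltInner c rs = c * pvHeadNZ (rs.map pvCount) := by
  induction rs with
  | nil => simp [pvAltInner, pvHeadNZ]
  | cons nxt rest ih =>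
    by_cases hd : pvCount nxt = 0
    · simp [pvAltInner, pvHeadNZ, hd, ih]
    · simp [pvAltInner, pvHeadNZ, hd]

-- gluing a new head onto the pair sum
lemma pvPairSum_head (t : Int) (l : List Int) :
    t * pvHeadNZ l + pvPairSum (l.filter (fun t => t ≠ 0))
      = pvPairSum (t :: l.filter (fun t => t ≠ 0)) := by
  cases h : l.filter (fun t => decide (t ≠ 0)) with
  | nil => unfold pvHeadNZ; rw [h]; simp [pvPairSum]
  | cons b r => unfold pvHeadNZ; rw [h]; simp [pvPairSum]

-- B's outer loop computes the adjacent-pair sum of the nonzero counts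
lemma pvAltOuter_eq (bank : List String) (res : Int) :
    pvAltOuter bank res
      = res + pvPairSum ((bank.map pvCount).filter (fun t => t ≠ 0)) := by
  induction bank generalizing res with
  | nil => simp [pvAltOuter, pvPairSum]
  | cons row rs ih =>
    by_cases hc : pvCount row = 0
    · rw [show pvAltOuter (row :: rs) res = pvAltOuter rs res from by
        simp [pvAltOuter, hc], ih, List.map_cons,
        show List.filter (fun t => decide (t ≠ 0)) (pvCount row :: rs.map pvCount)
          = List.filter (fun t => decide (t ≠ 0)) (rs.map pvCount) by simp [hc]]
    · simp only [pvAltOuter, if_neg hc, ih, pvAltInner_eq, List.map_cons]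
      rw [show List.filter (fun t => decide (t ≠ 0)) (pvCount row :: rs.map pvCount)
        = pvCount row :: List.filter (fun t => decide (t ≠ 0)) (rs.map pvCount) by simp [hc],
        ← pvPairSum_head]
      ring

-- ===== VERDICT (by name: the statement is the Claim_ definition above) =====
theorem nubmerOfBeams_spec : Claim_equal_nubmerOfBeams := by
  intro bank _
  show nubmerOfBeams bank = nubmerOfBeams_alt bank
  unfold nubmerOfBeams nubmerOfBeams_alt
  have hfold :
      (bank.foldl (fun (rc : Int × Int) line =>
        let t := line.toList.foldl (fun t item => if item == '1' then t + 1 else t) (0 : Int)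
        if rc.2 = 0 then (rc.1, t)
        else if t ≠ 0 then (rc.1 + t * rc.2, t) else rc) ((0 : Int), (0 : Int)))
      = ((bank.map pvCount).foldl pvStep ((0 : Int), (0 : Int))) := by
    rw [List.foldl_map]
    rfl
  rw [hfold, pvFold_zero, pvAltOuter_eq]
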